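-- pv_equiv track=rewrite | github.com/lujangarrigo/Fundamentos_Informatica | Repaso_Intro_Python/parte_2/ej7.py | funcion
-- ===== SOURCE A (Python) =====
-- string = "Hola, te envío este mensaje para avisarte que el martes se recuperará la clase de Contabilidad, saludos."
--
-- def funcion(string):
--     string_letras = "a b c d e f g h i j k l m n ñ o p q r s t u v w x y z A B C D E F G H I J K L M N Ñ O P Q R S T U V W X Y Z"
--     lista_letras = string_letras.split(" ")
--     lista_caracteres=list(string)
--     dict={}
--     string_letras = "a b c d e f g h i j k l m n ñ o p q r s t u v w x y z A B C D E F G H I J K L M N Ñ O P Q R S T U V W X Y Z"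
--     for i in lista_letras:
--         if i in lista_caracteres:
--             if i in dict:
--               dict[i]+=1
--             else:
--              dict[i]=1
--         else:
--             dict[i]=0
--     return dict
-- ===== SOURCE B (Python) =====
-- def funcion(string):
--     letras = "a b c d e f g h i j k l m n ñ o p q r s t u v w x y z A B C D E F G H I J K L M N Ñ O P Q R S T U V W X Y Z".split(" ")
--     d = {l: 0 for l in letras}
--     for c in string:
--         if c in d:
--             d[c] = 1
--     return d
-- ===== Notes on version B (the rewrite author's own statement) =====
-- stated objective: faster
-- what changed: B zero-initializes the result dict over the alphabet once and then makes a single pass over the string setting present keys to 1, instead of A's 54 membership scans of the character list.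
import Mathlib
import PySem

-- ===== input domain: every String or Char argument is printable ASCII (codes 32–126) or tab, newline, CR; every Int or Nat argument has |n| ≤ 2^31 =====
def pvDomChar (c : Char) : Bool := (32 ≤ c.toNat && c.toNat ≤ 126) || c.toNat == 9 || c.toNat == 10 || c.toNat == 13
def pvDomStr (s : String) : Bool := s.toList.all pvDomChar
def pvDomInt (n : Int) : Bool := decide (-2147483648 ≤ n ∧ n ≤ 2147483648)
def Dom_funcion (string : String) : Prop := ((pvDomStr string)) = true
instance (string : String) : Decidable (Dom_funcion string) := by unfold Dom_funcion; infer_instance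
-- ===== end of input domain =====

-- B replaces A's 54 membership scans of the string with a zero-initialized table and one pass over the string (objective: faster by a constant factor).

-- ===== PORT A =====
-- A: for each alphabet letter, scan the character list; the += branch is kept literally
-- (letters are distinct, so it can also be seen never to fire).
def funcion (string : String) : List (String × Int) :=
  let string_letras := "a b c d e f g h i j k l m n ñ o p q r s t u v w x y z A B C D E F G H I J K L M N Ñ O P Q R S T U V W X Y Z"
  -- .split(" "): sep is nonempty, so Python's split never raises; split? is some here
  let lista_letras := (PySem.Str.split? string_letras " ").getD []
  let lista_caracteres := string.toList.map Char.toString   -- list(string): 1-char strings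
  let dict := lista_letras.foldl (fun d i =>
    if lista_caracteres.contains i then
      (if d.contains i then d.modify i 0 (· + 1) else d.insert i 1)
    else d.insert i 0) (PySem.Dict.empty)
  dict.items

-- ===== PORT B =====
def funcion_alt (string : String) : List (String × Int) :=
  let letras := (PySem.Str.split? "a b c d e f g h i j k l m n ñ o p q r s t u v w x y z A B C D E F G H I J K L M N Ñ O P Q R S T U V W X Y Z" " ").getD []
  let d0 := letras.foldl (fun d l => d.insert l 0) (PySem.Dict.empty : PySem.Dict String Int)
  let d := string.toList.foldl (fun d c =>
    if d.contains c.toString then d.insert c.toString 1 else d) d0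
  d.items

-- ===== PRECONDITION & SPEC =====
def Spec_funcion (string : String) (out : List (String × Int)) : Prop := out = funcion_alt string
instance (string : String) (out : List (String × Int)) : Decidable (Spec_funcion string out) := by unfold Spec_funcion; infer_instance

-- ===== CLAIM (what is proved, stated in full; the proofs are below) =====
def Claim_equal_funcion : Prop := ∀ (string : String), Dom_funcion string → Spec_funcion string (funcion string)

-- ===== LEMMAS AND PROOFS =====

-- the alphabet list both ports split off
def pvLetras : List String := (PySem.Str.split? "a b c d e f g h i j k l m n ñ o p q r s t u v w x y z A B C D E F G H I J K L M N Ñ O P Q R S T U V W X Y Z" " ").getD []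

lemma pvLetras_nodup : pvLetras.Nodup := by decide

-- A's loop over fresh distinct letters appends (letter, indicator) pairs.
lemma fold_A (cs : List String) (L : List String) (d : PySem.Dict String Int)
    (h : (d.keys ++ L).Nodup) :
    (L.foldl (fun d i =>
      if cs.contains i then
        (if d.contains i then d.modify i 0 (· + 1) else d.insert i 1)
      else d.insert i 0) d).items
      = d.items ++ L.map (fun l => (l, if cs.contains l then (1 : Int) else 0)) := by
  induction L generalizing d with
  | nil => simp
  | cons i t ih =>
    have hnotin : i ∉ d.keys := by
      intro hmem
      exact (List.disjoint_of_nodup_append h) hmem (List.mem_cons_self)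
    have hco : d.contains i = false := by
      cases hcb : d.contains i
      · rfl
      · exact absurd ((PySem.Dict.contains_iff_mem_keys d i).1 hcb) hnotin
    have step : (if cs.contains i then
        (if d.contains i then d.modify i 0 (· + 1) else d.insert i 1)
      else d.insert i 0) = d.insert i (if cs.contains i then (1 : Int) else 0) := by
      rw [hco]
      by_cases hcs : cs.contains i = true
      · rw [if_pos hcs, if_pos hcs]
        simp
      · rw [if_neg hcs, if_neg hcs]
    rw [List.foldl_cons, step, ih]
    · rw [PySem.Dict.items_insert_of_not_contains d _ hco]
      simp
    · rw [PySem.Dict.keys_insert_of_not_contains d _ hco]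
      simpa using h

-- B's init loop: inserting fresh distinct keys with value 0 appends.
lemma fold_B0 (L : List String) (hnd : L.Nodup) :
    (L.foldl (fun d l => d.insert l 0) (PySem.Dict.empty : PySem.Dict String Int)).items
      = L.map (fun l => (l, (0 : Int))) := by
  have := PySem.Dict.items_foldl_insert_fresh (l := L) (d := (PySem.Dict.empty : PySem.Dict String Int))
    (k := fun l => l) (v := fun _ => (0 : Int))
    (by intro a _; simp) (by simpa using hnd)
  simpa using this

-- B's pass over the string: each present key is set to 1; items = pointwise update.
lemma fold_B1 (cs : List Char) (d : PySem.Dict String Int) (hnd : d.keys.Nodup) :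
    (cs.foldl (fun d c =>
      if d.contains c.toString then d.insert c.toString 1 else d) d).items
      = d.items.map (fun p =>
          if (cs.map Char.toString).contains p.1 then (p.1, (1 : Int)) else p) := by
  induction cs generalizing d with
  | nil => simp
  | cons c t ih =>
    rw [List.foldl_cons]
    by_cases hc : d.contains c.toString = true
    · rw [if_pos hc]
      have hnd' : (d.insert c.toString 1).keys.Nodup := by
        rw [PySem.Dict.keys_insert_of_contains d _ hc]; exact hnd
      rw [ih _ hnd', PySem.Dict.items_insert_of_contains d _ hc, List.map_map]
      apply List.map_congr_left
      intro p _
      by_cases hpe : p.1 = c.toString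
      · simp only [Function.comp, hpe, BEq.rfl, if_true, List.map_cons,
          List.contains_cons]
        simp
      · have hbe : (p.1 == c.toString) = false := by rw [beq_eq_false_iff_ne]; exact hpe
        simp only [Function.comp, hbe, Bool.false_eq_true, if_false,
          List.map_cons, List.contains_cons]
        simp
    · rw [if_neg hc, ih _ hnd]
      apply List.map_congr_left
      intro p hp
      have hkey : p.1 ∈ d.keys := PySem.Dict.mem_keys_of_mem_items d hp
      have hpe : p.1 ≠ c.toString := by
        intro h
        exact hc (by rw [← h] at *; exact (PySem.Dict.contains_iff_mem_keys d p.1).2 hkey)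
      have hps : ¬p.1 = String.singleton c := hpe
      simp [hps]

-- ===== VERDICT (by name: the statement is the Claim_ definition above) =====
theorem funcion_spec : Claim_equal_funcion := by
  intro string _
  unfold Spec_funcion funcion funcion_alt
  simp only
  rw [show ((PySem.Str.split? "a b c d e f g h i j k l m n ñ o p q r s t u v w x y z A B C D E F G H I J K L M N Ñ O P Q R S T U V W X Y Z" " ").getD [])
      = pvLetras from rfl]
  rw [fold_A (string.toList.map Char.toString) pvLetras PySem.Dict.empty
        (by simpa using pvLetras_nodup)]
  have hnd0 : ((pvLetras.foldl (fun d l => d.insert l 0)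
      (PySem.Dict.empty : PySem.Dict String Int)).keys).Nodup := by
    exact PySem.Dict.nodup_keys_foldl_insert pvLetras _ _ (by simp)
  rw [fold_B1 string.toList _ hnd0, fold_B0 pvLetras pvLetras_nodup, List.map_map]
  simp only [show (PySem.Dict.empty : PySem.Dict String Int).items = [] from rfl, List.nil_append]
  apply List.map_congr_left
  intro l _
  simp only [Function.comp]
  split_ifs <;> rfl
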